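-- pv_equiv track=rewrite | github.com/osava-nsit/osava | memory_allocation.py | check_external_frag
-- ===== SOURCE A (Python) =====
-- def check_external_frag(memory_allocated, process_size, total_size):
--     flag = 0 #variable to check if external fragmentation is present
--     free_space = 0
--     for i, pair in enumerate(memory_allocated):
--         process_name1,start1,end1 = pair
--         if(i == len(memory_allocated)-1):
--             free_space += total_size - end1
--             break
--         process_name2,start2,end2 = memory_allocated[i+1]
--         free_space += start2-end1
--     if free_space >= process_size:
--         flag = 1 #external fragmentation present
--         return flag
--     else:
--         return flag
-- ===== SOURCE B (Python) =====
-- def check_external_frag(memory_allocated, process_size, total_size):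
--     if memory_allocated:
--         occupied = sum(end - start for _, start, end in memory_allocated)
--         free_space = total_size - memory_allocated[0][1] - occupied
--     else:
--         free_space = 0
--     return 1 if free_space >= process_size else 0
-- ===== Notes on version B (the rewrite author's own statement) =====
-- stated objective: simpler
-- what changed: B computes free space as the complement (total_size minus the first block's start minus the summed sizes of the occupied blocks, equal to A's gap sum by telescoping) instead of A's index-based look-ahead loop over consecutive gaps with a break.
import Mathlib
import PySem

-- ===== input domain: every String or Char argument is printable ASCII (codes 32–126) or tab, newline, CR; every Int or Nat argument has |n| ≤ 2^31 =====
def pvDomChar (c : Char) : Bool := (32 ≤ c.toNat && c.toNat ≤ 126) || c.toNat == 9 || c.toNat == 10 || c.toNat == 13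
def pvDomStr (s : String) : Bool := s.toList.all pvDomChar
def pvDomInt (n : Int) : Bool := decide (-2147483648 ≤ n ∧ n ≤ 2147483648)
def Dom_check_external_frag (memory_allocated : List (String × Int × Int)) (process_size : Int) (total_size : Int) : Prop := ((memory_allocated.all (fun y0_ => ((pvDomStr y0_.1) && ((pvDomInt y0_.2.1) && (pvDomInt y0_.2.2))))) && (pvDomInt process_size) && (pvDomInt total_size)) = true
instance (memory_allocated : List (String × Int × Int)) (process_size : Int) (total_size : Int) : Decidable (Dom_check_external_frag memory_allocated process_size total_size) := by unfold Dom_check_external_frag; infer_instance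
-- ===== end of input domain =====

-- B replaces A's look-ahead gap loop by the telescoped complement: total_size - first start - summed occupied sizes (simpler decomposition; same O(n) cost).


-- ===== PORT A =====
-- A's loop: at each index look ahead to the next block; on the last block add total-end and break.
def fragLoopA (total_size : Int) : List (String × Int × Int) → Int → Int
  | [], free_space => free_space
  | [(_, _, end1)], free_space => free_space + (total_size - end1)
  | (_, _, end1) :: p2 :: rest, free_space =>
      fragLoopA total_size (p2 :: rest) (free_space + (p2.2.1 - end1))

def check_external_frag (memory_allocated : List (String × Int × Int)) (process_size : Int) (total_size : Int) : Int :=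
  let free_space := fragLoopA total_size memory_allocated 0
  if free_space ≥ process_size then 1 else 0

-- ===== PORT B =====
-- B: free space = total_size - first start - total occupied size (telescoped form).
def check_external_frag_alt (memory_allocated : List (String × Int × Int)) (process_size : Int) (total_size : Int) : Int :=
  let free_space :=
    match memory_allocated with
    | [] => 0
    | (_, start0, _) :: _ =>
        total_size - start0 -
          memory_allocated.foldl (fun acc x => acc + (x.2.2 - x.2.1)) 0
  if free_space ≥ process_size then 1 else 0

-- ===== PRECONDITION & SPEC =====
def Spec_check_external_frag (memory_allocated : List (String × Int × Int)) (process_size : Int) (total_size : Int) (out : Int) : Prop := out = check_external_frag_alt memory_allocated process_size total_size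
instance (memory_allocated : List (String × Int × Int)) (process_size : Int) (total_size : Int) (out : Int) : Decidable (Spec_check_external_frag memory_allocated process_size total_size out) := by unfold Spec_check_external_frag; infer_instance

-- ===== CLAIM (what is proved, stated in full; the proofs are below) =====
def Claim_equal_check_external_frag : Prop := ∀ (memory_allocated : List (String × Int × Int)) (process_size : Int) (total_size : Int), Dom_check_external_frag memory_allocated process_size total_size → Spec_check_external_frag memory_allocated process_size total_size (check_external_frag memory_allocated process_size total_size)

-- ===== LEMMAS AND PROOFS =====

-- ===== VERDICT (by name: the statement is the Claim_ definition above) =====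
theorem sumFold_shift :
    ∀ (l : List (String × Int × Int)) (c : Int),
      l.foldl (fun a x => a + (x.2.2 - x.2.1)) c
        = c + l.foldl (fun a x => a + (x.2.2 - x.2.1)) 0 := by
  intro l
  induction l with
  | nil => intro c; simp
  | cons p rest ih =>
      intro c
      simp only [List.foldl_cons]
      rw [ih (c + (p.2.2 - p.2.1)), ih (0 + (p.2.2 - p.2.1))]
      ring

theorem fragLoopA_eq (t : Int) :
    ∀ (n : String) (s e : Int) (m : List (String × Int × Int)) (acc : Int),
      fragLoopA t ((n, s, e) :: m) acc
        = acc + (t - s - ((n, s, e) :: m).foldl (fun a x => a + (x.2.2 - x.2.1)) 0) := by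
  intro n s e m
  induction m generalizing n s e with
  | nil => intro acc; simp [fragLoopA]
  | cons p2 rest ih =>
      intro acc
      obtain ⟨n2, s2, e2⟩ := p2
      rw [show fragLoopA t ((n, s, e) :: (n2, s2, e2) :: rest) acc
            = fragLoopA t ((n2, s2, e2) :: rest) (acc + (s2 - e)) from rfl, ih]
      rw [show (((n, s, e) :: (n2, s2, e2) :: rest).foldl
              (fun a x => a + (x.2.2 - x.2.1)) 0)
            = rest.foldl (fun a x => a + (x.2.2 - x.2.1)) ((0 + (e - s)) + (e2 - s2))
          from rfl,
          show (((n2, s2, e2) :: rest).foldl (fun a x => a + (x.2.2 - x.2.1)) 0)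
            = rest.foldl (fun a x => a + (x.2.2 - x.2.1)) (0 + (e2 - s2)) from rfl,
          sumFold_shift rest ((0 + (e - s)) + (e2 - s2)), sumFold_shift rest (0 + (e2 - s2))]
      ring

theorem check_external_frag_spec : Claim_equal_check_external_frag := by
  intro m p t _
  unfold Spec_check_external_frag check_external_frag check_external_frag_alt
  match m with
  | [] => rfl
  | (n, s, e) :: rest => rw [fragLoopA_eq t n s e rest 0]; ring_nf
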